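-- pv_equiv track=rewrite | github.com/lephubui/command-code | youtube/python/problems/target_sum_between_arrays.py | solution
-- ===== SOURCE A (Python) =====
-- def solution(arrA, arrB):
--     arr_map = {}
--     pair_list = []
--     for i in range(len(arrA)):
--         compute = arrA[i] - arrB[i]
--         if -compute in arr_map:
--             pair_list.append([arr_map[-compute], i])
--         if compute not in arr_map:
--             arr_map[compute] = i
--
--     if pair_list:
--         return min(pair_list)
--
--     return []
-- ===== SOURCE B (Python) =====
-- def solution(arrA, arrB):
--     diffs = [arrA[i] - arrB[i] for i in range(len(arrA))]
--     for first in range(len(diffs)):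
--         for second in range(first + 1, len(diffs)):
--             if diffs[first] == -diffs[second]:
--                 return [first, second]
--     return []
-- ===== Notes on version B (the rewrite author's own statement) =====
-- stated objective: simpler
-- what changed: A's one-pass first-occurrence dictionary with a final min() over all candidate pairs is replaced by a plain nested ascending scan over the precomputed difference list that returns the first cancelling index pair, which is automatically the lexicographically smallest; this trades A's linear-time hashing for a shorter quadratic double loop.
import Mathlib
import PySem

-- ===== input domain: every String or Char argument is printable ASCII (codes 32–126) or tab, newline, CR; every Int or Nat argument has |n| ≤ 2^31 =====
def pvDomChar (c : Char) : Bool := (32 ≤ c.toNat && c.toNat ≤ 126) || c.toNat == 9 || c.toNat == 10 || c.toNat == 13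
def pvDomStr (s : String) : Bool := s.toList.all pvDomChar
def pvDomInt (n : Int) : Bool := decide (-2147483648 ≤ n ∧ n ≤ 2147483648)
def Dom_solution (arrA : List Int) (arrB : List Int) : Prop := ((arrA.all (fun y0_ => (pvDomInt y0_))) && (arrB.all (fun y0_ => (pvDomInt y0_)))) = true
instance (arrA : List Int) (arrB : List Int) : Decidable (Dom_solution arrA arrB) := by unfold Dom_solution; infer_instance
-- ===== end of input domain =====

-- B replaces A's one-pass first-occurrence dictionary plus a final min over all candidate pairs
-- by a direct nested ascending scan over the difference list returning the first cancelling pair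
-- (which is the lexicographically smallest); objective: simpler code, no speed claim.

-- ===== PORT A =====
def solution (arrA : List Int) (arrB : List Int) : List Int :=
  let st := (PySem.List.pyRange 0 (arrA.length : Int) 1).foldl
    (fun (st : PySem.Dict Int Int × List (List Int)) (i : Int) =>
      let compute := (PySem.List.pyGet? arrA i).getD 0 - (PySem.List.pyGet? arrB i).getD 0
      let pl := if st.1.contains (-compute) then st.2 ++ [[st.1.getD (-compute) 0, i]] else st.2
      let m := if st.1.contains compute then st.1 else st.1.insert compute i
      (m, pl))
    ((PySem.Dict.empty : PySem.Dict Int Int), ([] : List (List Int)))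
  if st.2 ≠ [] then (PySem.List.min? st.2 (fun x => x)).getD [] else []

-- ===== PORT B =====
def solution_alt (arrA : List Int) (arrB : List Int) : List Int :=
  let diffs := (PySem.List.pyRange 0 (arrA.length : Int) 1).map
    (fun i => (PySem.List.pyGet? arrA i).getD 0 - (PySem.List.pyGet? arrB i).getD 0)
  match (PySem.List.pyRange 0 (diffs.length : Int) 1).findSome? (fun f =>
      (PySem.List.pyRange (f + 1) (diffs.length : Int) 1).findSome? (fun s =>
        if (PySem.List.pyGet? diffs f).getD 0 = -((PySem.List.pyGet? diffs s).getD 0)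
        then some [f, s] else none)) with
  | some p => p
  | none => []

-- ===== PRECONDITION & SPEC =====
-- Pre_ excludes exactly the inputs with arrB shorter than arrA: there arrB[i] raises IndexError in
-- both Pythons.
def Pre_solution (arrA : List Int) (arrB : List Int) : Prop := arrA.length ≤ arrB.length
instance (arrA : List Int) (arrB : List Int) : Decidable (Pre_solution arrA arrB) := by unfold Pre_solution; infer_instance
def pvWitness_solution : List Int × List Int := ([1, 2, -2], [0, 0, 0])

def Spec_solution (arrA : List Int) (arrB : List Int) (out : List Int) : Prop := out = solution_alt arrA arrB
instance (arrA : List Int) (arrB : List Int) (out : List Int) : Decidable (Spec_solution arrA arrB out) := by unfold Spec_solution; infer_instance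

-- ===== CLAIM (what is proved, stated in full; the proofs are below) =====
def Claim_equal_solution : Prop := ∀ (arrA : List Int) (arrB : List Int), Dom_solution arrA arrB → Pre_solution arrA arrB → Spec_solution arrA arrB (solution arrA arrB)

-- ===== LEMMAS AND PROOFS =====

-- d below is always the difference list zipWith (-) arrA arrB; both ports reduce to functions of d.
def fidx (d : List Int) (n : Nat) (v : Int) : Option Nat :=
  List.findIdx? (fun x => x = v) (d.take n)

def stepA (d : List Int) (st : PySem.Dict Int Int × List (List Int)) (i : Nat) :
    PySem.Dict Int Int × List (List Int) :=
  let c := d.getD i 0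
  let pl := if st.1.contains (-c) then st.2 ++ [[st.1.getD (-c) 0, (i : Int)]] else st.2
  let m := if st.1.contains c then st.1 else st.1.insert c (i : Int)
  (m, pl)

def stA (d : List Int) (n : Nat) : PySem.Dict Int Int × List (List Int) :=
  (List.range n).foldl (stepA d) ((PySem.Dict.empty : PySem.Dict Int Int), [])

def pairsOf (d : List Int) (n : Nat) : List (List Int) :=
  (List.range n).filterMap
    (fun i => (fidx d i (-(d.getD i 0))).map (fun j => ([(j : Int), (i : Int)] : List Int)))

def Good (d : List Int) (f s : Nat) : Prop :=
  f < s ∧ s < d.length ∧ d.getD f 0 = -(d.getD s 0)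

def altCore (d : List Int) : List Int :=
  match (PySem.List.pyRange 0 (d.length : Int) 1).findSome? (fun f =>
      (PySem.List.pyRange (f + 1) (d.length : Int) 1).findSome? (fun s =>
        if (PySem.List.pyGet? d f).getD 0 = -((PySem.List.pyGet? d s).getD 0)
        then some [f, s] else none)) with
  | some p => p
  | none => []

lemma getD_eq_get (d : List Int) (k : Nat) (h : k < d.length) : d.getD k 0 = d[k] := by
  simp [List.getD, List.getElem?_eq_getElem h]

lemma fidx_eq_some_iff (d : List Int) (n : Nat) (v : Int) (j : Nat) :
    fidx d n v = some j ↔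
      j < n ∧ j < d.length ∧ d.getD j 0 = v ∧ ∀ k < j, ¬(d.getD k 0 = v) := by
  unfold fidx
  rw [List.findIdx?_eq_some_iff_getElem]
  constructor
  · rintro ⟨h, hp, hmin⟩
    have hlen : j < min n d.length := by simpa using h
    have hj1 : j < n := lt_of_lt_of_le hlen (min_le_left _ _)
    have hj2 : j < d.length := lt_of_lt_of_le hlen (min_le_right _ _)
    refine ⟨hj1, hj2, ?_, ?_⟩
    · have ht : (d.take n)[j] = d[j] := List.getElem_take
      rw [getD_eq_get d j hj2]
      simpa [ht] using hp
    · intro k hk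
      have hk2 : k < d.length := lt_trans hk hj2
      have := hmin k hk
      have ht : (d.take n)[k]'(lt_trans hk h) = d[k] := List.getElem_take
      rw [getD_eq_get d k hk2]
      simpa [ht] using this
  · rintro ⟨hj1, hj2, hv, hmin⟩
    have hlen : j < (d.take n).length := by
      simp only [List.length_take]; omega
    refine ⟨hlen, ?_, ?_⟩
    · have ht : (d.take n)[j] = d[j] := List.getElem_take
      rw [getD_eq_get d j hj2] at hv
      simp [ht, hv]
    · intro k hk
      have hk2 : k < d.length := lt_trans hk hj2
      have ht : (d.take n)[k]'(lt_trans hk hlen) = d[k] := List.getElem_take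
      have := hmin k hk
      rw [getD_eq_get d k hk2] at this
      simpa [ht] using this

lemma fidx_eq_none_iff (d : List Int) (n : Nat) (v : Int) :
    fidx d n v = none ↔ ∀ j, j < n → j < d.length → ¬(d.getD j 0 = v) := by
  unfold fidx
  rw [List.findIdx?_eq_none_iff]
  constructor
  · intro h j hj1 hj2 hv
    have hmem : d[j] ∈ d.take n := by
      rw [List.mem_take_iff_getElem]
      refine ⟨j, by omega, rfl⟩
    have := h _ hmem
    rw [getD_eq_get d j hj2] at hv
    simp [hv] at this
  · intro h x hx
    rw [List.mem_take_iff_getElem] at hx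
    obtain ⟨j, hj, rfl⟩ := hx
    simp only [List.length_take, lt_min_iff] at hj
    have := h j hj.1 hj.2
    rw [getD_eq_get d j hj.2] at this
    simpa using this

lemma fidx_succ (d : List Int) (n : Nat) (v : Int) (hn : n < d.length) :
    fidx d (n + 1) v = (fidx d n v).or (if d.getD n 0 = v then some n else none) := by
  unfold fidx
  rw [List.take_add_one, List.findIdx?_append]
  have h1 : d[n]? = some d[n] := List.getElem?_eq_getElem hn
  have h2 : (d.take n).length = n := by simp only [List.length_take]; omega
  rw [getD_eq_get d n hn] at *
  by_cases hv : d[n] = v <;>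
    simp [h1, h2, List.findIdx?_cons, hv, getD_eq_get d n hn]

lemma stA_invariant (d : List Int) (n : Nat) (hn : n ≤ d.length) :
    (∀ v, (stA d n).1.get? v = (fidx d n v).map (fun j => (j : Int)))
      ∧ (stA d n).2 = pairsOf d n := by
  induction n with
  | zero =>
    constructor
    · intro v
      simp [stA, fidx, PySem.Dict.get?_empty]
    · simp [stA, pairsOf]
  | succ n ih =>
    have hn' : n < d.length := Nat.lt_of_succ_le hn
    obtain ⟨ihm, ihp⟩ := ih (Nat.le_of_lt hn')
    have hstep : stA d (n + 1) = stepA d (stA d n) n := by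
      unfold stA
      rw [List.range_succ, List.foldl_append, List.foldl_cons, List.foldl_nil]
    set c := d.getD n 0 with hc
    have hcontains : ∀ w, (stA d n).1.contains w = ((fidx d n w).map (fun j => (j : Int))).isSome := by
      intro w
      rw [PySem.Dict.contains_eq_isSome_get?, ihm w]
    constructor
    · intro v
      rw [hstep]
      show (if (stA d n).1.contains c then (stA d n).1 else (stA d n).1.insert c (n : Int)).get? v
        = _
      rw [fidx_succ d n v hn', ← hc, hcontains c]
      cases hfc : fidx d n c with
      | some j =>
        simp only [pysem, Option.bind_eq_bind, Option.bind_some, Option.pure_def,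
          Option.map_some, Option.isSome_some, reduceIte]
        rw [ihm v]
        by_cases hvc : c = v
        · subst hvc; simp [hfc]
        · rw [if_neg hvc, Option.or_none]; rfl
      | none =>
        simp only [pysem, Option.bind_eq_bind, Option.bind_none, Option.map_none,
          Option.isSome_none, Bool.false_eq_true, reduceIte]
        by_cases hvc : v = c
        · subst hvc
          simp [hfc]
        · rw [if_neg hvc, if_neg (fun h : c = v => hvc h.symm), Option.or_none, ihm v]; rfl
    · rw [hstep]
      show (if (stA d n).1.contains (-c) then (stA d n).2 ++ [[(stA d n).1.getD (-c) 0, (n : Int)]] else (stA d n).2) = _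
      have hpairs : pairsOf d (n + 1)
          = pairsOf d n ++ ((fidx d n (-(d.getD n 0))).map (fun j => ([(j : Int), (n : Int)] : List Int))).toList := by
        unfold pairsOf
        rw [List.range_succ, List.filterMap_append]
        congr 1
      rw [hpairs, ← hc, ihp, hcontains (-c), Option.isSome_map]
      cases hf : fidx d n (-c)
      · simp
      · rename_i j
        have hg : (stA d n).1.getD (-c) 0 = (j : Int) := by
          rw [PySem.Dict.getD_eq_get?_getD, ihm (-c), hf]
          rfl
        simp [hg]

lemma cond_iff (d : List Int) (f s : Int) (hf : 0 ≤ f) (hs : 0 ≤ s) :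
    ((PySem.List.pyGet? d f).getD 0 = -((PySem.List.pyGet? d s).getD 0))
      ↔ d.getD f.toNat 0 = -(d.getD s.toNat 0) := by
  rw [← Int.toNat_of_nonneg hf, ← Int.toNat_of_nonneg hs,
    PySem.List.pyGet?_natCast, PySem.List.pyGet?_natCast]
  rfl

lemma inner_eq_none (d : List Int) (f lo hi : Int) (hf : 0 ≤ f) (hflo : f < lo)
    (hhi : hi ≤ (d.length : Int))
    (h : ∀ s : Nat, (s : Int) < hi → ¬ Good d f.toNat s) :
    (PySem.List.pyRange lo hi 1).findSome? (fun s =>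
        if (PySem.List.pyGet? d f).getD 0 = -((PySem.List.pyGet? d s).getD 0)
        then some [f, s] else none) = none := by
  rw [List.findSome?_eq_none_iff]
  intro s hsmem
  rw [PySem.List.mem_pyRange_one] at hsmem
  obtain ⟨hs1, hs2⟩ := hsmem
  have hs0 : 0 ≤ s := by omega
  rw [if_neg]
  intro hcond
  rw [cond_iff d f s hf hs0] at hcond
  exact h s.toNat (by omega) ⟨by omega, by omega, hcond⟩

lemma altCore_of_no_good (d : List Int) (h : ∀ f s, ¬ Good d f s) : altCore d = [] := by
  unfold altCore
  rw [List.findSome?_eq_none_iff.mpr]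
  intro f hfmem
  rw [PySem.List.mem_pyRange_one] at hfmem
  exact inner_eq_none d f (f + 1) _ hfmem.1 (by omega) le_rfl (fun s _ => h f.toNat s)

lemma altCore_of_min (d : List Int) (fm sm : Nat) (hG : Good d fm sm)
    (hfmin : ∀ f < fm, ∀ s, ¬ Good d f s) (hsmin : ∀ s < sm, ¬ Good d fm s) :
    altCore d = [(fm : Int), (sm : Int)] := by
  obtain ⟨hfs, hslen, heq⟩ := hG
  have hout : (PySem.List.pyRange 0 (d.length : Int) 1).findSome? (fun f =>
      (PySem.List.pyRange (f + 1) (d.length : Int) 1).findSome? (fun s =>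
        if (PySem.List.pyGet? d f).getD 0 = -((PySem.List.pyGet? d s).getD 0)
        then some [f, s] else none)) = some [(fm : Int), (sm : Int)] := by
    rw [PySem.List.pyRange_one_append 0 (fm : Int) _ (by omega) (by omega),
      List.findSome?_append]
    have h1 : (PySem.List.pyRange 0 (fm : Int) 1).findSome? (fun f =>
        (PySem.List.pyRange (f + 1) (d.length : Int) 1).findSome? (fun s =>
          if (PySem.List.pyGet? d f).getD 0 = -((PySem.List.pyGet? d s).getD 0)
          then some [f, s] else none)) = none := by
      rw [List.findSome?_eq_none_iff]
      intro f hfmem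
      rw [PySem.List.mem_pyRange_one] at hfmem
      exact inner_eq_none d f (f + 1) _ hfmem.1 (by omega) le_rfl
        (fun s _ => hfmin f.toNat (by omega) s)
    rw [h1, Option.none_or, PySem.List.pyRange_one_cons (by omega : (fm : Int) < (d.length : Int)),
      List.findSome?_cons]
    have h2 : (PySem.List.pyRange ((fm : Int) + 1) (d.length : Int) 1).findSome? (fun s =>
        if (PySem.List.pyGet? d (fm : Int)).getD 0 = -((PySem.List.pyGet? d s).getD 0)
        then some [(fm : Int), s] else none) = some [(fm : Int), (sm : Int)] := by
      rw [PySem.List.pyRange_one_append ((fm : Int) + 1) (sm : Int) _ (by omega) (by omega),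
        List.findSome?_append]
      have h3 : (PySem.List.pyRange ((fm : Int) + 1) (sm : Int) 1).findSome? (fun s =>
          if (PySem.List.pyGet? d (fm : Int)).getD 0 = -((PySem.List.pyGet? d s).getD 0)
          then some [(fm : Int), s] else none) = none := by
        apply inner_eq_none d _ _ _ (by omega) (by omega) (by omega)
        intro s hs
        have : (fm : Int).toNat = fm := by omega
        rw [this]
        exact hsmin s (by omega)
      rw [h3, Option.none_or,
        PySem.List.pyRange_one_cons (by omega : (sm : Int) < (d.length : Int)),
        List.findSome?_cons]
      have hcond : (PySem.List.pyGet? d (fm : Int)).getD 0 = -((PySem.List.pyGet? d (sm : Int)).getD 0) := by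
        rw [cond_iff d _ _ (by omega) (by omega)]
        simpa using heq
      rw [if_pos hcond]
    rw [h2]
  unfold altCore
  rw [hout]

lemma lex_le_pair (a b c e : Int) (h : a < c ∨ (a = c ∧ b ≤ e)) :
    ([a, b] : List Int) ≤ [c, e] := by
  rcases h with h | ⟨rfl, h⟩
  · exact le_of_lt (List.Lex.rel h)
  · rcases lt_or_eq_of_le h with h | rfl
    · exact le_of_lt (List.Lex.cons (List.Lex.rel h))
    · exact le_refl _

lemma min?_inst_transfer (xs : List (List Int)) :
    @PySem.List.min? (List Int) (List Int) List.instLT (fun a b => a.decidableLT b) xs (fun x => x)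
    = @PySem.List.min? (List Int) (List Int)
        (@Preorder.toLT _ (@PartialOrder.toPreorder _ (@LinearOrder.toPartialOrder _ inferInstance)))
        (@LinearOrder.toDecidableLT _ inferInstance) xs (fun x => x) := by
  simp only [PySem.List.min?]
  apply PySem.List.foldl_congr_mem
  intro acc x _
  cases acc with
  | none => rfl
  | some m =>
    simp only []
    split_ifs with h1 <;> rfl

-- membership characterization of pairsOf
lemma mem_pairsOf_iff (d : List Int) (y : List Int) :
    y ∈ pairsOf d d.length ↔
      ∃ i j : Nat, fidx d i (-(d.getD i 0)) = some j ∧ i < d.length ∧ y = [(j : Int), (i : Int)] := by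
  unfold pairsOf
  rw [List.mem_filterMap]
  constructor
  · rintro ⟨i, hi, hmap⟩
    rw [List.mem_range] at hi
    cases hf : fidx d i (-(d.getD i 0)) with
    | none =>
      rw [hf] at hmap
      simp at hmap
    | some j =>
      rw [hf] at hmap
      have hy : ([(j : Int), (i : Int)] : List Int) = y := by simpa using hmap
      exact ⟨i, j, hf, hi, hy.symm⟩
  · rintro ⟨i, j, hf, hi, rfl⟩
    exact ⟨i, List.mem_range.mpr hi, by rw [hf]; rfl⟩

-- A's pair list is empty iff there is no good pair
lemma pairsOf_eq_nil (d : List Int) (h : ∀ f s, ¬ Good d f s) : pairsOf d d.length = [] := by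
  unfold pairsOf
  rw [List.filterMap_eq_nil_iff]
  intro i hi
  rw [List.mem_range] at hi
  rw [(fidx_eq_none_iff d i (-(d.getD i 0))).mpr]
  · rfl
  · intro j hj hjlen heq
    exact h j i ⟨hj, hi, heq⟩

-- the A-side value of min over the pair list
lemma min_pairsOf (d : List Int) (fm sm : Nat) (hG : Good d fm sm)
    (hfmin : ∀ f < fm, ∀ s, ¬ Good d f s) (hsmin : ∀ s < sm, ¬ Good d fm s) :
    PySem.List.min? (pairsOf d d.length) (fun x => x) = some [(fm : Int), (sm : Int)] := by
  obtain ⟨hfs, hslen, heq⟩ := hG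
  have hmem : ([(fm : Int), (sm : Int)] : List Int) ∈ pairsOf d d.length := by
    rw [mem_pairsOf_iff]
    refine ⟨sm, fm, ?_, hslen, rfl⟩
    rw [fidx_eq_some_iff]
    refine ⟨hfs, by omega, heq, ?_⟩
    intro k hk hkeq
    exact hfmin k hk sm ⟨by omega, hslen, hkeq⟩
  have hlb : ∀ y ∈ pairsOf d d.length, ([(fm : Int), (sm : Int)] : List Int) ≤ y := by
    intro y hy
    rw [mem_pairsOf_iff] at hy
    obtain ⟨i, j, hf, hi, rfl⟩ := hy
    rw [fidx_eq_some_iff] at hf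
    obtain ⟨hji, hjlen, hjeq, _⟩ := hf
    have hgood : Good d j i := ⟨hji, hi, hjeq⟩
    have hfj : fm ≤ j := by
      by_contra hlt
      exact hfmin j (by omega) i hgood
    rcases Nat.lt_or_ge fm j with hlt | hge
    · exact lex_le_pair _ _ _ _ (Or.inl (by exact_mod_cast hlt))
    · have : fm = j := by omega
      subst this
      have hsi : sm ≤ i := by
        by_contra hlt2
        exact hsmin i (by omega) hgood
      exact lex_le_pair _ _ _ _ (Or.inr ⟨rfl, by exact_mod_cast hsi⟩)
  cases hmq : PySem.List.min? (pairsOf d d.length) (fun x => x) with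
  | none =>
    rw [PySem.List.min?_eq_none_iff] at hmq
    rw [hmq] at hmem
    exact absurd hmem (List.not_mem_nil)
  | some m =>
    have hmq2 : @PySem.List.min? (List Int) (List Int)
        (@Preorder.toLT _ (@PartialOrder.toPreorder _ (@LinearOrder.toPartialOrder _ inferInstance)))
        (@LinearOrder.toDecidableLT _ inferInstance) (pairsOf d d.length) (fun x => x) = some m := by
      rw [← min?_inst_transfer]; exact hmq
    have h1 : m ≤ [(fm : Int), (sm : Int)] := by
      simpa using PySem.List.min?_isMin hmq2 _ hmem
    have h2 : ([(fm : Int), (sm : Int)] : List Int) ≤ m :=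
      hlb m (PySem.List.min?_mem hmq)
    rw [le_antisymm h1 h2]

lemma diff_getD (arrA arrB : List Int) (hpre : arrA.length ≤ arrB.length) (k : Nat)
    (hk : k < arrA.length) :
    (PySem.List.pyGet? arrA (k : Int)).getD 0 - (PySem.List.pyGet? arrB (k : Int)).getD 0
      = (List.zipWith (fun a b => a - b) arrA arrB).getD k 0 := by
  have hkB : k < arrB.length := lt_of_lt_of_le hk hpre
  have hz : k < (List.zipWith (fun a b => a - b) arrA arrB).length := by
    rw [List.length_zipWith]; omega
  rw [PySem.List.pyGet?_natCast, PySem.List.pyGet?_natCast,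
    List.getElem?_eq_getElem hk, List.getElem?_eq_getElem hkB,
    getD_eq_get _ _ hz, List.getElem_zipWith]
  rfl

lemma zip_length (arrA arrB : List Int) (hpre : arrA.length ≤ arrB.length) :
    (List.zipWith (fun a b : Int => a - b) arrA arrB).length = arrA.length := by
  rw [List.length_zipWith]; omega

lemma solution_eq_core (arrA arrB : List Int) (hpre : arrA.length ≤ arrB.length) :
    solution arrA arrB =
      (if (stA (List.zipWith (fun a b => a - b) arrA arrB)
            (List.zipWith (fun a b => a - b) arrA arrB).length).2 ≠ [] then
        (PySem.List.min? (stA (List.zipWith (fun a b => a - b) arrA arrB)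
            (List.zipWith (fun a b => a - b) arrA arrB).length).2 (fun x => x)).getD []
      else []) := by
  set d := List.zipWith (fun a b : Int => a - b) arrA arrB with hd
  have hfold : (PySem.List.pyRange 0 (arrA.length : Int) 1).foldl
      (fun (st : PySem.Dict Int Int × List (List Int)) (i : Int) =>
        let compute := (PySem.List.pyGet? arrA i).getD 0 - (PySem.List.pyGet? arrB i).getD 0
        let pl := if st.1.contains (-compute) then st.2 ++ [[st.1.getD (-compute) 0, i]] else st.2
        let m := if st.1.contains compute then st.1 else st.1.insert compute i
        (m, pl))
      ((PySem.Dict.empty : PySem.Dict Int Int), ([] : List (List Int)))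
      = stA d d.length := by
    rw [PySem.List.pyRange_one, List.foldl_map]
    unfold stA
    rw [zip_length arrA arrB hpre]
    have hlen : ((arrA.length : Int) - 0).toNat = arrA.length := by omega
    rw [hlen]
    apply PySem.List.foldl_congr_mem
    intro acc k hk
    rw [List.mem_range] at hk
    have hcast : (0 : Int) + (k : Int) = (k : Int) := by omega
    rw [hcast]
    unfold stepA
    simp only [diff_getD arrA arrB hpre k hk, ← hd]
  simp only [solution, hfold]

lemma solution_alt_eq_altCore (arrA arrB : List Int) (hpre : arrA.length ≤ arrB.length) :
    solution_alt arrA arrB = altCore (List.zipWith (fun a b => a - b) arrA arrB) := by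
  set d := List.zipWith (fun a b : Int => a - b) arrA arrB with hd
  have hdiffs : (PySem.List.pyRange 0 (arrA.length : Int) 1).map
      (fun i => (PySem.List.pyGet? arrA i).getD 0 - (PySem.List.pyGet? arrB i).getD 0) = d := by
    rw [PySem.List.pyRange_one, List.map_map]
    have hlen : ((arrA.length : Int) - 0).toNat = arrA.length := by omega
    rw [hlen]
    apply List.ext_getElem
    · rw [List.length_map, List.length_range, zip_length arrA arrB hpre]
    · intro k hk1 hk2
      rw [List.getElem_map, List.getElem_range]
      have hkA : k < arrA.length := by
        rw [List.length_map, List.length_range] at hk1; exact hk1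
      have hcast : (0 : Int) + (k : Int) = (k : Int) := by omega
      simp only [Function.comp_apply, hcast]
      rw [diff_getD arrA arrB hpre k hkA, ← hd, getD_eq_get _ _ hk2]
  unfold solution_alt altCore
  rw [hdiffs]

theorem main_equiv (arrA arrB : List Int) (hpre : arrA.length ≤ arrB.length) :
    solution arrA arrB = solution_alt arrA arrB := by
  rw [solution_eq_core arrA arrB hpre, solution_alt_eq_altCore arrA arrB hpre]
  set d := List.zipWith (fun a b : Int => a - b) arrA arrB with hd
  rw [(stA_invariant d d.length le_rfl).2]
  haveI : ∀ (f s : Nat), Decidable (Good d f s) := fun f s => by unfold Good; infer_instance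
  by_cases h : ∃ f, ∃ s, Good d f s
  · haveI : DecidablePred (fun f => ∃ s, Good d f s) := fun f =>
      decidable_of_iff (∃ s ∈ List.range d.length, Good d f s)
        ⟨fun ⟨s, _, hg⟩ => ⟨s, hg⟩, fun ⟨s, hg⟩ => ⟨s, List.mem_range.mpr hg.2.1, hg⟩⟩
    have hPf : ∃ s, Good d (Nat.find h) s := Nat.find_spec h
    have hG : Good d (Nat.find h) (Nat.find hPf) := Nat.find_spec hPf
    have hfmin : ∀ f < Nat.find h, ∀ s, ¬ Good d f s := fun f hf s hg =>
      Nat.find_min h hf ⟨s, hg⟩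
    have hsmin : ∀ s < Nat.find hPf, ¬ Good d (Nat.find h) s := fun s hs =>
      Nat.find_min hPf hs
    have hmq := min_pairsOf d (Nat.find h) (Nat.find hPf) hG hfmin hsmin
    have hne : pairsOf d d.length ≠ [] := by
      intro hnil
      rw [hnil] at hmq
      simp [PySem.List.min?] at hmq
    rw [if_pos hne, hmq, altCore_of_min d (Nat.find h) (Nat.find hPf) hG hfmin hsmin]
    rfl
  · push Not at h
    rw [altCore_of_no_good d (fun f s => h f s), pairsOf_eq_nil d (fun f s => h f s)]
    simp

-- ===== VERDICT (by name: the statement is the Claim_ definition above) =====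
theorem solution_spec : Claim_equal_solution := by
  intro arrA arrB _ hpre
  unfold Spec_solution
  exact main_equiv arrA arrB hpre
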